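-- pv_equiv track=rewrite | github.com/RyanAAClark/Welton_IlCodes | RyanCode/ChargeArmAnalysis/SplitIntoComCocFiles.py | strToEmp
-- ===== SOURCE A (Python) =====
-- def strToEmp(x):
-- 	x=[char for char in x] # Turn vector into list
-- 	Elements = []
-- 	# Find elements in string
-- 	for item in x:
-- 		if item not in Elements:
-- 			Elements += [item]
-- 	Emp = ""
-- 	if "C" in Elements:
-- 		Emp+="C"
-- 		count = sum([char=="C" for char in x])
-- 		if count>1:
-- 			Emp+=str(count)
-- 		Elements.remove("C")
-- 	if "H" in Elements:
-- 		Emp+="H"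
-- 		count = sum([char=="H" for char in x])
-- 		if count>1:
-- 			Emp+=str(count)
-- 		Elements.remove("H")
-- 	Elements = sorted(Elements, key=str.upper)
-- 	for element in Elements:
-- 		Emp+=element
-- 		count = sum([char==element for char in x])
-- 		if count>1:
-- 			Emp+=str(count)
-- 	return Emp
-- ===== SOURCE B (Python) =====
-- def strToEmp(x):
--     counts = {}
--     for ch in x:
--         counts[ch] = counts.get(ch, 0) + 1
--     def key(ch):
--         if ch == "C":
--             return (0, "")
--         if ch == "H":
--             return (1, "")
--         return (2, ch.upper())
--     parts = []
--     for ch in sorted(counts, key=key):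
--         parts.append(ch)
--         if counts[ch] > 1:
--             parts.append(str(counts[ch]))
--     return "".join(parts)
-- ===== Notes on version B (the rewrite author's own statement) =====
-- stated objective: faster
-- what changed: B builds one character-count dict in a single pass and sorts the distinct characters once with a composite key (carbon first, hydrogen second, the rest by upper-cased character), emitting the formula in one loop; A dedups with a membership loop, emits three separate hand-unrolled blocks and rescans the whole string with sum() for every element, mutating the element list with remove.
import Mathlib
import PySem

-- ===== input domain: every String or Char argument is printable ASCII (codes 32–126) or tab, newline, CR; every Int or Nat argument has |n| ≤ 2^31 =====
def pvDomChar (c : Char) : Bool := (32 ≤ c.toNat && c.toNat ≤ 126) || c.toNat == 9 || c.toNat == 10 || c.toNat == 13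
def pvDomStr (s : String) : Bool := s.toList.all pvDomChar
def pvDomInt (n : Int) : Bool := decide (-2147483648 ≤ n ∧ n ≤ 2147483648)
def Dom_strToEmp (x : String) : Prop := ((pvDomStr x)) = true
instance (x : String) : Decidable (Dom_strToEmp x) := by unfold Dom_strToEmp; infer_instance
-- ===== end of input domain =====

-- B replaces A's dedup loop, three hand-unrolled emission blocks and per-element rescans of x
-- by one counting pass and a single sort with a composite key (carbon first, hydrogen second,
-- the rest by upper-cased character); measured faster in a timing run (one pass over x instead of a rescan per element).

-- ===== PORT A =====
def strToEmp (x : String) : String :=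
  let xs := x.toList
  let elements : List Char := xs.foldl (fun acc c => if c ∈ acc then acc else acc ++ [c]) []
  let emp : String := ""
  let p1 : String × List Char :=
    if 'C' ∈ elements then
      let e := emp ++ "C"
      let count : Int := (xs.map (fun ch => if ch = 'C' then (1 : Int) else 0)).sum
      let e := if count > 1 then e ++ PySem.Int.toStr count else e
      -- Elements.remove("C"): guarded by 'C' ∈ elements, so remove? is `some` and getD never defaults
      (e, (PySem.List.remove? elements 'C').getD elements)
    else (emp, elements)
  let emp := p1.1
  let elements := p1.2
  let p2 : String × List Char :=
    if 'H' ∈ elements then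
      let e := emp ++ "H"
      let count : Int := (xs.map (fun ch => if ch = 'H' then (1 : Int) else 0)).sum
      let e := if count > 1 then e ++ PySem.Int.toStr count else e
      (e, (PySem.List.remove? elements 'H').getD elements)
    else (emp, elements)
  let emp := p2.1
  let elements := p2.2
  let elements := PySem.List.sorted elements (fun c => PySem.Str.upper (String.ofList [c])) false
  elements.foldl (fun emp e =>
    let emp := emp ++ String.ofList [e]
    let count : Int := (xs.map (fun ch => if ch = e then (1 : Int) else 0)).sum
    if count > 1 then emp ++ PySem.Int.toStr count else emp) emp

-- ===== PORT B =====
def bKey1 (c : Char) : Int := if c = 'C' then 0 else if c = 'H' then 1 else 2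
def bKey2 (c : Char) : String :=
  if c = 'C' then "" else if c = 'H' then "" else PySem.Str.upper (String.ofList [c])

def strToEmp_alt (x : String) : String :=
  let cs := x.toList
  let counts : PySem.Dict Char Int :=
    cs.foldl (fun d ch => d.insert ch (d.getD ch 0 + 1)) PySem.Dict.empty
  let ks := PySem.List.sorted2 counts.keys bKey1 bKey2 false
  let parts : List String := ks.foldl (fun ps ch =>
      let ps := ps ++ [String.ofList [ch]]
      -- counts[ch]: ch is always a key of counts, so getD never defaults
      if counts.getD ch 0 > 1 then ps ++ [PySem.Int.toStr (counts.getD ch 0)] else ps) []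
  PySem.Str.join "" parts

-- ===== PRECONDITION & SPEC =====
def Spec_strToEmp (x : String) (out : String) : Prop := out = strToEmp_alt x
instance (x : String) (out : String) : Decidable (Spec_strToEmp x out) := by unfold Spec_strToEmp; infer_instance

-- ===== CLAIM (what is proved, stated in full; the proofs are below) =====
def Claim_equal_strToEmp : Prop := ∀ (x : String), Dom_strToEmp x → Spec_strToEmp x (strToEmp x)

-- ===== LEMMAS AND PROOFS =====

-- proof-only helpers
def aKeyF (c : Char) : String := PySem.Str.upper (String.ofList [c])
def b2 (a b : Char) : Bool :=
  decide (bKey1 a < bKey1 b) || (!decide (bKey1 b < bKey1 a) && decide (bKey2 a < bKey2 b))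
def bA (a b : Char) : Bool := decide (aKeyF a < aKeyF b)

def gem (cs : List Char) (e : Char) : String :=
  String.ofList [e] ++ (if ((cs.count e : Int) > 1) then PySem.Int.toStr ((cs.count e : Int)) else "")

def gems (cs : List Char) : List Char → String
  | [] => ""
  | e :: t => gem cs e ++ gems cs t

def seqOf (cs : List Char) : List Char :=
  (PySem.Set.ofList cs).filter (fun c => c == 'C') ++
  ((PySem.Set.ofList cs).filter (fun c => c == 'H') ++
   PySem.List.sorted ((PySem.Set.ofList cs).filter (fun c => !(c == 'C') && !(c == 'H'))) aKeyF false)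

-- insertBy equations
theorem insertBy_nil {α : Type} (b : α → α → Bool) (x : α) :
    PySem.List.insertBy b x [] = [x] := by simp [PySem.List.insertBy]

theorem insertBy_cons {α : Type} (b : α → α → Bool) (x y : α) (ys : List α) :
    PySem.List.insertBy b x (y :: ys)
      = if b x y then x :: y :: ys else y :: PySem.List.insertBy b x ys := by
  simp [PySem.List.insertBy]

theorem insertPast {α : Type} (b : α → α → Bool) (x : α) (p s : List α)
    (hp : ∀ y ∈ p, b x y = false) :
    PySem.List.insertBy b x (p ++ s) = p ++ PySem.List.insertBy b x s := by
  induction p with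
  | nil => simp
  | cons y t ih =>
    have hy := hp y (by simp)
    simp only [List.cons_append, insertBy_cons, hy]
    simp [ih (fun z hz => hp z (by simp [hz]))]

theorem insertMid {α : Type} (b : α → α → Bool) (x : α) (p s : List α)
    (hp : ∀ y ∈ p, b x y = false) (hs : ∀ y ∈ s, b x y = true) :
    PySem.List.insertBy b x (p ++ s) = p ++ x :: s := by
  rw [insertPast b x p s hp]
  cases s with
  | nil => simp [insertBy_nil]
  | cons y t => simp [insertBy_cons, hs y (by simp)]

theorem insertCongr {α : Type} (b b' : α → α → Bool) (x : α) (ys : List α)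
    (h : ∀ y ∈ ys, b x y = b' x y) :
    PySem.List.insertBy b x ys = PySem.List.insertBy b' x ys := by
  induction ys with
  | nil => simp [insertBy_nil]
  | cons y t ih =>
    rw [insertBy_cons, insertBy_cons, h y (by simp), ih (fun z hz => h z (by simp [hz]))]

theorem sorted2_foldl (l : List Char) :
    PySem.List.sorted2 l bKey1 bKey2 false
      = l.foldl (fun acc x => PySem.List.insertBy b2 x acc) [] := rfl

theorem sortedA_foldl (l : List Char) :
    PySem.List.sorted l aKeyF false
      = l.foldl (fun acc x => PySem.List.insertBy bA x acc) [] := by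
  rw [PySem.List.sorted_eq_foldl_insertBy]; rfl

-- b2 on concrete buckets
theorem bKey1_other {y : Char} (h1 : y ≠ 'C') (h2 : y ≠ 'H') : bKey1 y = 2 := by
  simp [bKey1, h1, h2]

theorem b2_c_other {y : Char} (h1 : y ≠ 'C') (h2 : y ≠ 'H') : b2 'C' y = true := by
  simp only [b2, bKey1_other h1 h2]
  simp [bKey1]

theorem b2_h_other {y : Char} (h1 : y ≠ 'C') (h2 : y ≠ 'H') : b2 'H' y = true := by
  simp only [b2, bKey1_other h1 h2]
  simp [bKey1]

theorem b2_other_c {a : Char} (h1 : a ≠ 'C') (h2 : a ≠ 'H') : b2 a 'C' = false := by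
  simp only [b2, bKey1_other h1 h2]
  simp [bKey1]

theorem b2_other_h {a : Char} (h1 : a ≠ 'C') (h2 : a ≠ 'H') : b2 a 'H' = false := by
  simp only [b2, bKey1_other h1 h2]
  simp [bKey1]

theorem b2_other_other {a y : Char} (ha1 : a ≠ 'C') (ha2 : a ≠ 'H')
    (hy1 : y ≠ 'C') (hy2 : y ≠ 'H') : b2 a y = bA a y := by
  simp [b2, bA, bKey1_other ha1 ha2, bKey1_other hy1 hy2, bKey2, ha1, ha2, hy1, hy2, aKeyF]

theorem b2_cc : b2 'C' 'C' = false := by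
  have h : ¬ ("" : String) < "" := lt_irrefl _
  simp [b2, bKey1, bKey2]

theorem b2_ch : b2 'C' 'H' = true := by
  simp [b2, bKey1]

theorem b2_hc : b2 'H' 'C' = false := by
  simp [b2, bKey1]

theorem b2_hh : b2 'H' 'H' = false := by
  have h : ¬ ("" : String) < "" := lt_irrefl _
  simp [b2, bKey1, bKey2]

-- the sorted2 bucket decomposition
theorem sorted2_decomp (l : List Char) :
    PySem.List.sorted2 l bKey1 bKey2 false
      = l.filter (fun c => c == 'C') ++
        (l.filter (fun c => c == 'H') ++
         PySem.List.sorted (l.filter (fun c => !(c == 'C') && !(c == 'H'))) aKeyF false) := by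
  induction l using List.reverseRecOn with
  | nil => rfl
  | append_singleton l a ih =>
    have hL : PySem.List.sorted2 (l ++ [a]) bKey1 bKey2 false
        = PySem.List.insertBy b2 a (PySem.List.sorted2 l bKey1 bKey2 false) := by
      rw [sorted2_foldl, sorted2_foldl, List.foldl_append]; rfl
    have hmem2 : ∀ y ∈ PySem.List.sorted (l.filter (fun c => !(c == 'C') && !(c == 'H'))) aKeyF false,
        y ≠ 'C' ∧ y ≠ 'H' := by
      intro y hy
      rw [PySem.List.mem_sorted] at hy
      have := List.of_mem_filter hy
      simpa using this
    have hmemC : ∀ y ∈ l.filter (fun c => c == 'C'), y = 'C' := by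
      intro y hy; simpa using List.of_mem_filter hy
    have hmemH : ∀ y ∈ l.filter (fun c => c == 'H'), y = 'H' := by
      intro y hy; simpa using List.of_mem_filter hy
    rw [hL, ih]
    by_cases hc : a = 'C'
    · subst hc
      rw [insertMid b2 'C' _ _
        (fun y hy => by rw [hmemC y hy]; exact b2_cc)
        (by
          intro y hy
          rcases List.mem_append.mp hy with hy1 | hy2
          · rw [hmemH y hy1]; exact b2_ch
          · exact b2_c_other (hmem2 y hy2).1 (hmem2 y hy2).2)]
      simp [List.filter_append]
    · by_cases hh : a = 'H'
      · subst hh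
        rw [insertPast b2 'H' _ _ (fun y hy => by rw [hmemC y hy]; exact b2_hc)]
        rw [insertMid b2 'H' _ _
          (fun y hy => by rw [hmemH y hy]; exact b2_hh)
          (fun y hy => b2_h_other (hmem2 y hy).1 (hmem2 y hy).2)]
        simp [List.filter_append]
      · rw [insertPast b2 a _ _
          (fun y hy => by rw [hmemC y hy]; exact b2_other_c hc hh)]
        rw [insertPast b2 a _ _
          (fun y hy => by rw [hmemH y hy]; exact b2_other_h hc hh)]
        rw [insertCongr b2 bA a _ (fun y hy => b2_other_other hc hh (hmem2 y hy).1 (hmem2 y hy).2)]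
        have hR : PySem.List.sorted ((l ++ [a]).filter (fun c => !(c == 'C') && !(c == 'H'))) aKeyF false
            = PySem.List.insertBy bA a
                (PySem.List.sorted (l.filter (fun c => !(c == 'C') && !(c == 'H'))) aKeyF false) := by
          rw [List.filter_append, sortedA_foldl, sortedA_foldl]
          simp [List.foldl_append, hc, hh]
        rw [hR]
        simp [List.filter_append, hc, hh]

-- A's dedup loop is Set.ofList
theorem foldA (cs : List Char) :
    cs.foldl (fun acc c => if c ∈ acc then acc else acc ++ [c]) [] = PySem.Set.ofList cs := by
  rw [PySem.Set.ofList_eq_foldl]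
  congr 1
  funext acc c
  by_cases h : c ∈ acc <;> simp [PySem.Set.add, h]

-- the 0/1 sum is the count
theorem countA (cs : List Char) (e : Char) :
    ((cs.map (fun ch => if ch = e then (1 : Int) else 0)).sum) = (cs.count e : Int) := by
  induction cs with
  | nil => simp
  | cons h t ih =>
    by_cases hh : h = e
    · simp [hh, ih]
      ring
    · simp [hh, ih]

theorem filter_single {l : List Char} (h : l.Nodup) (a : Char) :
    l.filter (fun c => c == a) = if a ∈ l then [a] else [] := by
  induction l with
  | nil => simp
  | cons b t ih =>
    rcases List.nodup_cons.mp h with ⟨hb, ht⟩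
    by_cases hba : b = a
    · subst hba
      simp [ih ht, hb]
    · have : (a ∈ b :: t) ↔ (a ∈ t) := by simp [Ne.symm hba]
      simp [hba, ih ht, this]

theorem gems_append (cs : List Char) (u v : List Char) :
    gems cs (u ++ v) = gems cs u ++ gems cs v := by
  induction u with
  | nil => simp [gems]
  | cons e t ih => simp [gems, ih, String.append_assoc]

-- join with empty separator
theorem chars_join_empty (ls : List (List Char)) : PySem.Chars.join [] ls = ls.flatten := by
  induction ls with
  | nil => simp [PySem.Chars.join_nil]
  | cons p rest ih =>
    cases rest with
    | nil => simp [PySem.Chars.join_singleton]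
    | cons q r => rw [PySem.Chars.join_cons_cons, ih]; simp

theorem join_empty_append (ps qs : List String) :
    PySem.Str.join "" (ps ++ qs) = PySem.Str.join "" ps ++ PySem.Str.join "" qs := by
  rw [← String.toList_inj]
  simp [PySem.Str.toList_join, chars_join_empty]

theorem join_empty_single (s : String) : PySem.Str.join "" [s] = s := by
  rw [← String.toList_inj]
  simp [PySem.Str.toList_join]

theorem join_empty_pair (s t : String) : PySem.Str.join "" [s, t] = s ++ t := by
  rw [← String.toList_inj]
  simp [PySem.Str.toList_join, chars_join_empty]

theorem join_empty_nil : PySem.Str.join "" ([] : List String) = "" := by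
  rw [← String.toList_inj]
  simp [PySem.Str.toList_join]

-- A's emission loop (counts already rewritten to cs.count)
theorem A_loop (cs : List Char) (l : List Char) (a : String) :
    l.foldl (fun emp e =>
      if ((cs.count e : Int)) > 1 then emp ++ String.ofList [e] ++ PySem.Int.toStr ((cs.count e : Int))
      else emp ++ String.ofList [e]) a
    = a ++ gems cs l := by
  induction l generalizing a with
  | nil => simp [gems]
  | cons e t ih =>
    rw [List.foldl_cons, ih]
    by_cases hgt : ((cs.count e : Int) > 1) <;>
      simp [gem, gems, hgt, String.append_assoc]

-- B's emission loop (counts already rewritten to cs.count)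
theorem B_loop (cs : List Char) (l : List Char) (ps : List String) :
    PySem.Str.join "" (l.foldl (fun ps ch =>
      let ps := ps ++ [String.ofList [ch]]
      if ((cs.count ch : Int)) > 1 then ps ++ [PySem.Int.toStr ((cs.count ch : Int))] else ps) ps)
    = PySem.Str.join "" ps ++ gems cs l := by
  induction l generalizing ps with
  | nil => simp [gems]
  | cons e t ih =>
    rw [List.foldl_cons, ih]
    by_cases hgt : ((cs.count e : Int) > 1) <;>
      simp [hgt, join_empty_append, join_empty_single, join_empty_pair, gem, gems, String.append_assoc]

-- B equals the canonical form
theorem B_eq (x : String) : strToEmp_alt x = gems x.toList (seqOf x.toList) := by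
  unfold strToEmp_alt
  simp only [PySem.Dict.foldl_insert_getD_add_one_eq_counter, PySem.Dict.keys_counter,
    PySem.Dict.getD_counter, sorted2_decomp]
  rw [B_loop]
  simp [seqOf, join_empty_nil]

-- erasing 'C' then 'H' from the nodup element list is the third bucket's filter
theorem erase_filter_C {E : List Char} (hnd : E.Nodup) :
    E.erase 'C' = E.filter (fun c => !(c == 'C')) := by
  simpa [bne] using List.Nodup.erase_eq_filter hnd 'C'

theorem erase_filter_CH {E : List Char} (hnd : E.Nodup) :
    (E.erase 'C').erase 'H' = E.filter (fun c => !(c == 'C') && !(c == 'H')) := by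
  rw [List.Nodup.erase_eq_filter (hnd.erase 'C') 'H', erase_filter_C hnd, List.filter_filter]
  simp only [bne]
  exact List.filter_congr (fun a _ => Bool.and_comm _ _)

theorem aKeyF_eta : aKeyF = fun c => PySem.Str.upper (String.ofList [c]) := rfl

theorem filter_CH_of_notC {E : List Char} (hC : 'C' ∉ E) :
    E.filter (fun c => !(c == 'C') && !(c == 'H')) = E.filter (fun c => !(c == 'H')) := by
  apply List.filter_congr
  intro a ha
  have : a ≠ 'C' := fun h => hC (h ▸ ha)
  simp [this]

theorem filter_H_of_notH {E : List Char} (hH : 'H' ∉ E) :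
    E.filter (fun c => !(c == 'H')) = E := by
  apply List.filter_eq_self.mpr
  intro a ha
  have : a ≠ 'H' := fun h => hH (h ▸ ha)
  simp [this]

-- A equals the canonical form
theorem A_eq (x : String) : strToEmp x = gems x.toList (seqOf x.toList) := by
  unfold strToEmp
  have hnd := PySem.Set.nodup_ofList x.toList
  simp only [foldA, countA]
  by_cases hC : 'C' ∈ PySem.Set.ofList x.toList
  · have hrm : (PySem.List.remove? (PySem.Set.ofList x.toList) 'C').getD (PySem.Set.ofList x.toList)
        = (PySem.Set.ofList x.toList).erase 'C' := by
      rw [PySem.List.remove?_eq_some_erase _ 'C' hC]; rfl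
    simp only [hC, if_pos, hrm]
    by_cases hH : 'H' ∈ (PySem.Set.ofList x.toList).erase 'C'
    · have hHE : 'H' ∈ PySem.Set.ofList x.toList := List.mem_of_mem_erase hH
      have hrm2 : (PySem.List.remove? ((PySem.Set.ofList x.toList).erase 'C') 'H').getD
            ((PySem.Set.ofList x.toList).erase 'C')
          = ((PySem.Set.ofList x.toList).erase 'C').erase 'H' := by
        rw [PySem.List.remove?_eq_some_erase _ 'H' hH]; rfl
      simp only [hH, if_pos, hrm2]
      rw [erase_filter_CH hnd, A_loop]
      rw [seqOf, filter_single hnd 'C', filter_single hnd 'H']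
      simp only [hC, hHE, if_pos, gems_append]
      by_cases hc1 : ((x.toList.count 'C' : Int) > 1) <;>
        by_cases hh1 : ((x.toList.count 'H' : Int) > 1) <;>
          simp [hc1, hh1, gems, gem, aKeyF_eta, ← String.append_assoc]
    · have hHE : 'H' ∉ PySem.Set.ofList x.toList := fun h =>
        hH (List.mem_erase_of_ne (by decide) |>.mpr h)
      simp only [hH, reduceIte]
      rw [erase_filter_C hnd, ← filter_H_of_notH (E := (PySem.Set.ofList x.toList).filter (fun c => !(c == 'C'))) (by
            intro h; exact hHE (List.mem_of_mem_filter h)), List.filter_filter, A_loop]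
      have hcm : (PySem.Set.ofList x.toList).filter (fun a => (!(a == 'H')) && (!(a == 'C')))
          = (PySem.Set.ofList x.toList).filter (fun c => !(c == 'C') && !(c == 'H')) :=
        List.filter_congr (fun a _ => Bool.and_comm _ _)
      rw [hcm]
      rw [seqOf, filter_single hnd 'C', filter_single hnd 'H']
      simp only [hC, hHE, if_pos, gems_append]
      by_cases hc1 : ((x.toList.count 'C' : Int) > 1) <;>
        simp [hc1, gems, gem, aKeyF_eta]
  · simp only [hC, reduceIte]
    by_cases hH : 'H' ∈ PySem.Set.ofList x.toList
    · have hrm2 : (PySem.List.remove? (PySem.Set.ofList x.toList) 'H').getD (PySem.Set.ofList x.toList)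
          = (PySem.Set.ofList x.toList).erase 'H' := by
        rw [PySem.List.remove?_eq_some_erase _ 'H' hH]; rfl
      simp only [hH, if_pos, hrm2]
      have h3 : (PySem.Set.ofList x.toList).erase 'H'
          = (PySem.Set.ofList x.toList).filter (fun c => !(c == 'C') && !(c == 'H')) := by
        rw [filter_CH_of_notC hC]
        simpa [bne] using List.Nodup.erase_eq_filter hnd 'H'
      rw [h3, A_loop]
      rw [seqOf, filter_single hnd 'C', filter_single hnd 'H']
      simp only [hC, hH, if_pos, gems_append]
      by_cases hh1 : ((x.toList.count 'H' : Int) > 1) <;>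
        simp [hh1, gems, gem, aKeyF_eta, ← String.append_assoc]
    · simp only [hH, reduceIte]
      have h3 : PySem.Set.ofList x.toList
          = (PySem.Set.ofList x.toList).filter (fun c => !(c == 'C') && !(c == 'H')) := by
        rw [filter_CH_of_notC hC, filter_H_of_notH hH]
      rw [h3, A_loop]
      rw [seqOf, filter_single hnd 'C', filter_single hnd 'H']
      simp only [hC, hH, gems_append]
      simp [gems, aKeyF_eta, ← h3]

-- ===== VERDICT (by name: the statement is the Claim_ definition above) =====
theorem strToEmp_spec : Claim_equal_strToEmp := by
  intro x _
  unfold Spec_strToEmp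
  rw [A_eq, B_eq]
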